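-- pv_equiv track=rewrite | github.com/timoast/sctools | sctools/sctools.py | scan_tags
-- ===== SOURCE A (Python) =====
-- def scan_tags(tags):
--     """
--     Input bam tags
--     Return UMI and cell barcode sequences
--     """
--     cell_barcode = None
--     umi = None
--     for tag in tags:
--         if tag[0] == "CB":
--             cell_barcode = tag[1]
--         elif tag[0] == "UB":
--             umi = tag[1]
--         else:
--             pass
--     return cell_barcode, umi
-- ===== SOURCE B (Python) =====
-- def scan_tags(tags):
--     """
--     Input bam tags
--     Return UMI and cell barcode sequences
--     """
--     d = {t[0]: t[1] for t in tags}
--     return d.get("CB"), d.get("UB")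
-- ===== Notes on version B (the rewrite author's own statement) =====
-- stated objective: simpler
-- what changed: Replaces the per-element conditional scan maintaining two variables with building a first-to-second dictionary once and looking up 'CB' and 'UB'.
import Mathlib
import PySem

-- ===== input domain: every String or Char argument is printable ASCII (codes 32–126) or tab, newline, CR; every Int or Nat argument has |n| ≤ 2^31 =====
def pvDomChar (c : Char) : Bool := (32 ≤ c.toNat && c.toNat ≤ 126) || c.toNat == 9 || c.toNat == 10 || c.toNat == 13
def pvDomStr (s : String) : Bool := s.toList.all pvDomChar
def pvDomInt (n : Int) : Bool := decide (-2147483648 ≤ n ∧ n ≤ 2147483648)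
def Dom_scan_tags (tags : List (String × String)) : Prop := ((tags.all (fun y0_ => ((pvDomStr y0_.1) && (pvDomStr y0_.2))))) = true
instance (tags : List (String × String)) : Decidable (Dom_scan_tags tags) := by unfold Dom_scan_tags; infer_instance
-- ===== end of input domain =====

-- B replaces the two-variable conditional scan with a dict built once plus two lookups (simpler decomposition).


-- ===== PORT A =====
-- for tag in tags: if tag[0]=="CB": cell_barcode=tag[1]; elif tag[0]=="UB": umi=tag[1]
def scan_tags (tags : List (String × String)) : Option String × Option String :=
  tags.foldl
    (fun st tag =>
      if tag.1 = "CB" then (some tag.2, st.2)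
      else if tag.1 = "UB" then (st.1, some tag.2)
      else st)
    (none, none)

-- ===== PORT B =====
-- d = {t[0]: t[1] for t in tags}; return d.get("CB"), d.get("UB")
def scan_tags_alt (tags : List (String × String)) : Option String × Option String :=
  let d := tags.foldl (fun d t => d.insert t.1 t.2) (PySem.Dict.empty : PySem.Dict String String)
  (d.get? "CB", d.get? "UB")

-- ===== PRECONDITION & SPEC =====
def Spec_scan_tags (tags : List (String × String)) (out : Option String × Option String) : Prop := out = scan_tags_alt tags
instance (tags : List (String × String)) (out : Option String × Option String) : Decidable (Spec_scan_tags tags out) := by unfold Spec_scan_tags; infer_instance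

-- ===== CLAIM (what is proved, stated in full; the proofs are below) =====
def Claim_equal_scan_tags : Prop := ∀ (tags : List (String × String)), Dom_scan_tags tags → Spec_scan_tags tags (scan_tags tags)

-- ===== LEMMAS AND PROOFS =====

-- Invariant: A's fold from state (d.get? "CB", d.get? "UB") tracks B's dict fold.
lemma scan_tags_loop (tags : List (String × String)) (d : PySem.Dict String String) :
    tags.foldl
      (fun st tag =>
        if tag.1 = "CB" then (some tag.2, st.2)
        else if tag.1 = "UB" then (st.1, some tag.2)
        else st)
      (d.get? "CB", d.get? "UB")
    = (let d' := tags.foldl (fun d t => d.insert t.1 t.2) d; (d'.get? "CB", d'.get? "UB")) := by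
  induction tags generalizing d with
  | nil => rfl
  | cons t rest ih =>
    simp only [List.foldl_cons]
    rw [← ih (d.insert t.1 t.2)]
    congr 1
    rw [PySem.Dict.get?_insert, PySem.Dict.get?_insert]
    by_cases h1 : t.1 = "CB"
    · simp [h1]
    · by_cases h2 : t.1 = "UB"
      · simp [h2]
      · simp [h1, h2, Ne.symm h1, Ne.symm h2]

-- ===== VERDICT (by name: the statement is the Claim_ definition above) =====
theorem scan_tags_spec : Claim_equal_scan_tags := by
  intro tags _
  unfold Spec_scan_tags scan_tags scan_tags_alt
  have := scan_tags_loop tags PySem.Dict.empty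
  simpa [PySem.Dict.get?_empty] using this
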